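-- pv_equiv track=rewrite | github.com/gdfrh/AGV | robot_arm.py | find_key_and_list_for_index
-- ===== SOURCE A (Python) =====
-- def find_key_and_list_for_index(data_dict, index):
--     current_index = 0
--     for key, lists in data_dict.items():
--         for lst in lists:
--             if current_index == index:
--                 return key, lst  # 返回找到的键和列表
--             current_index += 1
--     return None, None  # 如果没有找到，返回None
-- ===== SOURCE B (Python) =====
-- def find_key_and_list_for_index(data_dict, index):
--     if index < 0:
--         return None, None
--     for key, lists in data_dict.items():
--         if index < len(lists):
--             return key, lists[index]
--         index -= len(lists)
--     return None, None
-- ===== Notes on version B (the rewrite author's own statement) =====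
-- stated objective: alternative
-- what changed: Replaces A's per-sublist running-counter scan with group skipping: each key's whole group is skipped by subtracting len(lists) in O(1), and the hit is a single direct subscript into that group, so the element-level inner loop disappears.
import Mathlib
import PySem

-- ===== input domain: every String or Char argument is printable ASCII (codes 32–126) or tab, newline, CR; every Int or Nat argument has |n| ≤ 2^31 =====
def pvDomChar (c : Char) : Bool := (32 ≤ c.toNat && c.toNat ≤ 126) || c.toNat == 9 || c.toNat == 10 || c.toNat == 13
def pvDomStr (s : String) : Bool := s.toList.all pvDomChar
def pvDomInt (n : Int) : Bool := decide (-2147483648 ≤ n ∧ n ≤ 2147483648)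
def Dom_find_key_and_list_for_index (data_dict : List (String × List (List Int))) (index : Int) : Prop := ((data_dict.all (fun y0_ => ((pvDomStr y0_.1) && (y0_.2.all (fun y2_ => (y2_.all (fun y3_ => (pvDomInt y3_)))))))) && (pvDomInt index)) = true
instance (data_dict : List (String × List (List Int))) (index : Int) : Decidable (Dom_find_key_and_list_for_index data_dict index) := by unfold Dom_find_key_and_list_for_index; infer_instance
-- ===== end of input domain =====

-- ===== PORT A =====
-- B skips whole key-groups arithmetically (subtract the group length, subscript on a hit) instead of A's per-sublist counter scan (objective: alternative).
-- inner loop of A: walk the sublists of one key, threading current_index; .inl = early return, .inr = updated counter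
def fkInner (key : String) (lsts : List (List Int)) (cur index : Int) :
    Sum (Option String × Option (List Int)) Int :=
  match lsts with
  | [] => .inr cur
  | lst :: rest =>
      if cur = index then .inl (some key, some lst)
      else fkInner key rest (cur + 1) index

-- outer loop of A over the dict's items
def fkOuter (items : List (String × List (List Int))) (cur index : Int) :
    Option String × Option (List Int) :=
  match items with
  | [] => (none, none)
  | (key, lists) :: rest =>
      match fkInner key lists cur index with
      | .inl res => res
      | .inr cur' => fkOuter rest cur' index

def find_key_and_list_for_index (data_dict : List (String × List (List Int))) (index : Int) : Option String × Option (List Int) :=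
  fkOuter data_dict 0 index

-- ===== PORT B =====
-- B's loop: skip each group by subtracting its length, or subscript into it
def fkSkip (items : List (String × List (List Int))) (index : Int) :
    Option String × Option (List Int) :=
  match items with
  | [] => (none, none)
  | (key, lists) :: rest =>
      if index < lists.length then
        match lists[index.toNat]? with
        | some lst => (some key, some lst)
        | none => (none, none)
      else fkSkip rest (index - lists.length)

def find_key_and_list_for_index_alt (data_dict : List (String × List (List Int))) (index : Int) : Option String × Option (List Int) :=
  if index < 0 then (none, none) else fkSkip data_dict index

-- ===== PRECONDITION & SPEC =====
def Spec_find_key_and_list_for_index (data_dict : List (String × List (List Int))) (index : Int) (out : Option String × Option (List Int)) : Prop := out = find_key_and_list_for_index_alt data_dict index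
instance (data_dict : List (String × List (List Int))) (index : Int) (out : Option String × Option (List Int)) : Decidable (Spec_find_key_and_list_for_index data_dict index out) := by unfold Spec_find_key_and_list_for_index; infer_instance

-- ===== CLAIM (what is proved, stated in full; the proofs are below) =====
def Claim_equal_find_key_and_list_for_index : Prop := ∀ (data_dict : List (String × List (List Int))) (index : Int), Dom_find_key_and_list_for_index data_dict index → Spec_find_key_and_list_for_index data_dict index (find_key_and_list_for_index data_dict index)

-- ===== LEMMAS AND PROOFS =====

theorem fkInner_char (key : String) (lsts : List (List Int)) (cur index : Int) :
    fkInner key lsts cur index =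
      (if cur ≤ index ∧ index < cur + lsts.length then
        match lsts[(index - cur).toNat]? with
        | some lst => Sum.inl (some key, some lst)
        | none => Sum.inl (none, none)
      else Sum.inr (cur + lsts.length)) := by
  induction lsts generalizing cur with
  | nil => simp only [fkInner, List.length_nil]
           rw [if_neg (by push_cast; omega)]
           simp
  | cons l ls ih =>
      simp only [fkInner, ih, List.length_cons]
      by_cases h : cur = index
      · subst h
        rw [if_pos rfl, if_pos (by push_cast; omega)]
        have h0 : (cur - cur).toNat = 0 := by omega
        rw [h0]
        simp
      · rw [if_neg h]
        by_cases h2 : cur + 1 ≤ index ∧ index < cur + 1 + ls.length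
        · rw [if_pos h2, if_pos (by push_cast at h2 ⊢; omega)]
          have hn : (index - cur).toNat = (index - (cur + 1)).toNat + 1 := by omega
          simp [hn]
        · rw [if_neg h2, if_neg (by push_cast at h2 ⊢; omega)]
          congr 1
          push_cast
          ring

theorem fkOuter_skip (items : List (String × List (List Int))) (cur index : Int)
    (h : cur ≤ index) :
    fkOuter items cur index = fkSkip items (index - cur) := by
  induction items generalizing cur with
  | nil => rfl
  | cons p rest ih =>
      obtain ⟨key, lists⟩ := p
      simp only [fkOuter, fkInner_char, fkSkip]
      by_cases hin : index < cur + lists.length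
      · rw [if_pos ⟨h, hin⟩, if_pos (by omega)]
        cases e : lists[(index - cur).toNat]? with
        | none => simp
        | some v => simp
      · rw [if_neg (by omega), if_neg (by omega)]
        show fkOuter rest (cur + ↑lists.length) index = fkSkip rest (index - cur - ↑lists.length)
        rw [ih (cur + lists.length) (by omega)]
        congr 1
        ring

theorem fkOuter_neg (items : List (String × List (List Int))) (cur index : Int)
    (h : index < cur) : fkOuter items cur index = (none, none) := by
  induction items generalizing cur with
  | nil => rfl
  | cons p rest ih =>
      obtain ⟨key, lists⟩ := p
      simp only [fkOuter, fkInner_char]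
      rw [if_neg (by omega)]
      exact ih _ (by omega)

-- ===== VERDICT (by name: the statement is the Claim_ definition above) =====
theorem find_key_and_list_for_index_spec : Claim_equal_find_key_and_list_for_index := by
  intro data_dict index _
  unfold Spec_find_key_and_list_for_index find_key_and_list_for_index find_key_and_list_for_index_alt
  by_cases h : index < 0
  · rw [if_pos h, fkOuter_neg _ _ _ h]
  · rw [if_neg h, fkOuter_skip _ _ _ (by omega)]
    simp
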